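-- pv_equiv track=rewrite | github.com/Jid3459/VoiceAuth | backend/app/middleware/voice_authenticator.py | resolve_threshold
-- ===== SOURCE A (Python) =====
-- from typing import Dict, Optional
--
-- TASK_THRESHOLDS: Dict[str, int] = {
--     # Calibrated for browser-recorded audio. Honest same-speaker clips via
--     # MediaRecorder land at cosine similarity ~0.55-0.70, which the trust
--     # curve maps to ~60-75 overall. Imposters cluster well below 30, so
--     # these floors keep the security gap while letting real users through.
--     "low": 45,         # browse / read-only queries, low-stakes orders
--     "medium": 60,      # mid-value purchases, account changes
--     "high": 78,        # high-value purchases, sensitive operations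
--     "critical": 88,    # password change, transfer, admin actions
-- }
--
-- def resolve_threshold(task_text: str, default: int = 50) -> int:
--     """Pick a threshold based on simple keywords in the spoken/typed task.
--
--     The amount-aware AuthorizationService refines this further once a price is
--     known. Keep this list explicit and conservative - if a keyword is missing
--     the request still has to clear `default` and then the amount check.
--     """
--     if not task_text:
--         return default
--     t = task_text.lower()
--
--     # Truly high-stakes operations always need a high trust score.
--     critical_kw = ("transfer", "password", "delete account", "wire ", "admin")
--     # Big-ticket purchases need medium-high trust; the amount-aware
--     # AuthorizationService still applies its own check on top of this.
--     high_kw = ("gold", "jewel", "diamond", "rolex")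
--     medium_kw = (
--         "laptop", "iphone", "macbook", "tv", "television",
--         "headphone", "watch", "shoes", "bag", "tablet", "camera",
--     )
--
--     if any(k in t for k in critical_kw):
--         return TASK_THRESHOLDS["critical"]
--     if any(k in t for k in high_kw):
--         return TASK_THRESHOLDS["high"]
--     if any(k in t for k in medium_kw):
--         return TASK_THRESHOLDS["medium"]
--     return default
-- ===== SOURCE B (Python) =====
-- # One flat keyword->threshold table + max of matched thresholds, instead of
-- # three ordered any() cascades (valid because higher tiers have higher values).
-- _KW_TABLE = [
--     ("transfer", 88), ("password", 88), ("delete account", 88),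
--     ("wire ", 88), ("admin", 88),
--     ("gold", 78), ("jewel", 78), ("diamond", 78), ("rolex", 78),
--     ("laptop", 60), ("iphone", 60), ("macbook", 60), ("tv", 60),
--     ("television", 60), ("headphone", 60), ("watch", 60), ("shoes", 60),
--     ("bag", 60), ("tablet", 60), ("camera", 60),
-- ]
--
-- def _hits(t):
--     return [thr for kw, thr in _KW_TABLE if kw in t]
--
-- def resolve_threshold(task_text: str, default: int = 50) -> int:
--     if not task_text:
--         return default
--     hits = _hits(task_text.lower())
--     return max(hits) if hits else default
-- ===== Notes on version B (the rewrite author's own statement) =====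
-- stated objective: simpler
-- what changed: Replaced the three ordered any()-cascades over priority tuples by one flat keyword-to-threshold table and a single pass returning max of the matched thresholds (valid because higher tiers have strictly higher thresholds), keeping the empty-text default guard.
import Mathlib
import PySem

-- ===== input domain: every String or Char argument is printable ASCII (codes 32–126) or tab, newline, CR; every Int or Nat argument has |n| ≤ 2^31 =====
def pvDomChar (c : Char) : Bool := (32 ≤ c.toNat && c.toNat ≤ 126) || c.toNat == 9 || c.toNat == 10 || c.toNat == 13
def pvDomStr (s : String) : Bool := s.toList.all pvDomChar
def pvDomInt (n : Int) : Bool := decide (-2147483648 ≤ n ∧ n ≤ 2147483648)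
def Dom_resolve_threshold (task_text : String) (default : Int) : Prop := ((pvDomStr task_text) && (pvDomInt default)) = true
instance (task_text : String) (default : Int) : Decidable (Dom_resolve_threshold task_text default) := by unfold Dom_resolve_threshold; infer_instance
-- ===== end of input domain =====

-- B replaces A's three ordered any()-cascades by one flat keyword→threshold table
-- and a max over the matched thresholds (objective: simpler decomposition, same cost).

-- ===== PORT A =====
-- TASK_THRESHOLDS dict; A indexes it only with keys that are present, so the
-- KeyError branch is unreachable and getD's fallback 0 is never used.
def TASK_THRESHOLDS : PySem.Dict String Int :=
  PySem.Dict.ofList [("low", 45), ("medium", 60), ("high", 78), ("critical", 88)]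

def critical_kw : List String := ["transfer", "password", "delete account", "wire ", "admin"]
def high_kw : List String := ["gold", "jewel", "diamond", "rolex"]
def medium_kw : List String :=
  ["laptop", "iphone", "macbook", "tv", "television",
   "headphone", "watch", "shoes", "bag", "tablet", "camera"]

def resolve_threshold (task_text : String) (default : Int) : Int :=
  if task_text == "" then default
  else
    let t := PySem.Str.lower task_text
    if critical_kw.any (fun k => PySem.Str.isIn k t) then TASK_THRESHOLDS.getD "critical" 0
    else if high_kw.any (fun k => PySem.Str.isIn k t) then TASK_THRESHOLDS.getD "high" 0
    else if medium_kw.any (fun k => PySem.Str.isIn k t) then TASK_THRESHOLDS.getD "medium" 0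
    else default

-- ===== PORT B =====
def kwTable : List (String × Int) :=
  [("transfer", 88), ("password", 88), ("delete account", 88),
   ("wire ", 88), ("admin", 88),
   ("gold", 78), ("jewel", 78), ("diamond", 78), ("rolex", 78),
   ("laptop", 60), ("iphone", 60), ("macbook", 60), ("tv", 60),
   ("television", 60), ("headphone", 60), ("watch", 60), ("shoes", 60),
   ("bag", 60), ("tablet", 60), ("camera", 60)]

-- _hits: the thresholds of every table keyword occurring in t
def hitsB (t : String) : List Int :=
  (kwTable.filter (fun p => PySem.Str.isIn p.1 t)).map Prod.snd

def resolve_threshold_alt (task_text : String) (default : Int) : Int :=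
  if task_text == "" then default
  else
    let hits := hitsB (PySem.Str.lower task_text)
    (hits.max?).getD default   -- max(hits) if hits else default

-- ===== PRECONDITION & SPEC =====
def Spec_resolve_threshold (task_text : String) (default : Int) (out : Int) : Prop := out = resolve_threshold_alt task_text default
instance (task_text : String) (default : Int) (out : Int) : Decidable (Spec_resolve_threshold task_text default out) := by unfold Spec_resolve_threshold; infer_instance

-- ===== CLAIM (what is proved, stated in full; the proofs are below) =====
def Claim_equal_resolve_threshold : Prop := ∀ (task_text : String) (default : Int), Dom_resolve_threshold task_text default → Spec_resolve_threshold task_text default (resolve_threshold task_text default)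

-- ===== LEMMAS AND PROOFS =====

-- a table entry whose keyword occurs in t contributes its threshold to the hits
lemma mem_hits_of (t k : String) (v : Int) (hq : (k, v) ∈ kwTable)
    (hin : PySem.Str.isIn k t = true) : v ∈ hitsB t :=
  List.mem_map.mpr ⟨(k, v), List.mem_filter.mpr ⟨hq, hin⟩, rfl⟩

lemma crit_mem_hits (t : String)
    (h : critical_kw.any (fun k => PySem.Str.isIn k t) = true) : (88 : Int) ∈ hitsB t := by
  rcases List.any_eq_true.mp h with ⟨k, hk, hin⟩
  fin_cases hk <;> exact mem_hits_of _ _ 88 (by decide) hin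

lemma high_mem_hits (t : String)
    (h : high_kw.any (fun k => PySem.Str.isIn k t) = true) : (78 : Int) ∈ hitsB t := by
  rcases List.any_eq_true.mp h with ⟨k, hk, hin⟩
  fin_cases hk <;> exact mem_hits_of _ _ 78 (by decide) hin

lemma medium_mem_hits (t : String)
    (h : medium_kw.any (fun k => PySem.Str.isIn k t) = true) : (60 : Int) ∈ hitsB t := by
  rcases List.any_eq_true.mp h with ⟨k, hk, hin⟩
  fin_cases hk <;> exact mem_hits_of _ _ 60 (by decide) hin

-- every hit is at most 88
lemma hits_le_88 (t : String) : ∀ b ∈ hitsB t, b ≤ 88 := by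
  intro b hb
  rcases List.mem_map.mp hb with ⟨q, hq, rfl⟩
  have hmem := (List.mem_filter.mp hq).1
  fin_cases hmem <;> norm_num

-- with no critical keyword matching, every hit is at most 78
lemma hits_le_78 (t : String)
    (hc : critical_kw.any (fun k => PySem.Str.isIn k t) = false) : ∀ b ∈ hitsB t, b ≤ 78 := by
  have hc' : ∀ x ∈ critical_kw, PySem.Str.isIn x t = false :=
    fun x hx => by simpa using List.any_eq_false.mp hc x hx
  have h1 := hc' "transfer" (by decide)
  have h2 := hc' "password" (by decide)
  have h3 := hc' "delete account" (by decide)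
  have h4 := hc' "wire " (by decide)
  have h5 := hc' "admin" (by decide)
  intro b hb
  rcases List.mem_map.mp hb with ⟨q, hq, rfl⟩
  rcases List.mem_filter.mp hq with ⟨hmem, hin⟩
  fin_cases hmem <;> simp_all

-- with no critical and no high keyword matching, every hit is at most 60
lemma hits_le_60 (t : String)
    (hc : critical_kw.any (fun k => PySem.Str.isIn k t) = false)
    (hh : high_kw.any (fun k => PySem.Str.isIn k t) = false) : ∀ b ∈ hitsB t, b ≤ 60 := by
  have hc' : ∀ x ∈ critical_kw, PySem.Str.isIn x t = false :=
    fun x hx => by simpa using List.any_eq_false.mp hc x hx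
  have hh' : ∀ x ∈ high_kw, PySem.Str.isIn x t = false :=
    fun x hx => by simpa using List.any_eq_false.mp hh x hx
  have h1 := hc' "transfer" (by decide)
  have h2 := hc' "password" (by decide)
  have h3 := hc' "delete account" (by decide)
  have h4 := hc' "wire " (by decide)
  have h5 := hc' "admin" (by decide)
  have h6 := hh' "gold" (by decide)
  have h7 := hh' "jewel" (by decide)
  have h8 := hh' "diamond" (by decide)
  have h9 := hh' "rolex" (by decide)
  intro b hb
  rcases List.mem_map.mp hb with ⟨q, hq, rfl⟩
  rcases List.mem_filter.mp hq with ⟨hmem, hin⟩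
  fin_cases hmem <;> simp_all

-- no tier matches → no hits at all
lemma hits_nil (t : String)
    (hc : critical_kw.any (fun k => PySem.Str.isIn k t) = false)
    (hh : high_kw.any (fun k => PySem.Str.isIn k t) = false)
    (hm : medium_kw.any (fun k => PySem.Str.isIn k t) = false) : hitsB t = [] := by
  have hc' : ∀ x ∈ critical_kw, PySem.Str.isIn x t = false :=
    fun x hx => by simpa using List.any_eq_false.mp hc x hx
  have hh' : ∀ x ∈ high_kw, PySem.Str.isIn x t = false :=
    fun x hx => by simpa using List.any_eq_false.mp hh x hx
  have hm' : ∀ x ∈ medium_kw, PySem.Str.isIn x t = false :=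
    fun x hx => by simpa using List.any_eq_false.mp hm x hx
  have h1 := hc' "transfer" (by decide)
  have h2 := hc' "password" (by decide)
  have h3 := hc' "delete account" (by decide)
  have h4 := hc' "wire " (by decide)
  have h5 := hc' "admin" (by decide)
  have h6 := hh' "gold" (by decide)
  have h7 := hh' "jewel" (by decide)
  have h8 := hh' "diamond" (by decide)
  have h9 := hh' "rolex" (by decide)
  have h10 := hm' "laptop" (by decide)
  have h11 := hm' "iphone" (by decide)
  have h12 := hm' "macbook" (by decide)
  have h13 := hm' "tv" (by decide)
  have h14 := hm' "television" (by decide)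
  have h15 := hm' "headphone" (by decide)
  have h16 := hm' "watch" (by decide)
  have h17 := hm' "shoes" (by decide)
  have h18 := hm' "bag" (by decide)
  have h19 := hm' "tablet" (by decide)
  have h20 := hm' "camera" (by decide)
  have hfil : kwTable.filter (fun p => PySem.Str.isIn p.1 t) = [] := by
    rw [List.filter_eq_nil_iff]
    intro q hq
    fin_cases hq <;> simp_all
  unfold hitsB
  rw [hfil]
  rfl

-- ===== VERDICT (by name: the statement is the Claim_ definition above) =====
theorem resolve_threshold_spec : Claim_equal_resolve_threshold := by
  intro task_text default _
  unfold Spec_resolve_threshold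
  cases hE : (task_text == "") with
  | true => simp only [resolve_threshold, resolve_threshold_alt, hE, if_true]
  | false =>
    cases hc : critical_kw.any (fun k => PySem.Str.isIn k (PySem.Str.lower task_text)) with
    | true =>
      have hmax : (hitsB (PySem.Str.lower task_text)).max? = some 88 :=
        List.max?_eq_some_iff.mpr ⟨crit_mem_hits _ hc, hits_le_88 _⟩
      simp only [resolve_threshold, resolve_threshold_alt, hE, hc, Bool.false_eq_true,
                 if_false, if_true, hmax, Option.getD_some]
      decide
    | false =>
      cases hh : high_kw.any (fun k => PySem.Str.isIn k (PySem.Str.lower task_text)) with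
      | true =>
        have hmax : (hitsB (PySem.Str.lower task_text)).max? = some 78 :=
          List.max?_eq_some_iff.mpr ⟨high_mem_hits _ hh, hits_le_78 _ hc⟩
        simp only [resolve_threshold, resolve_threshold_alt, hE, hc, hh, Bool.false_eq_true,
                   if_false, if_true, hmax, Option.getD_some]
        decide
      | false =>
        cases hm : medium_kw.any (fun k => PySem.Str.isIn k (PySem.Str.lower task_text)) with
        | true =>
          have hmax : (hitsB (PySem.Str.lower task_text)).max? = some 60 :=
            List.max?_eq_some_iff.mpr ⟨medium_mem_hits _ hm, hits_le_60 _ hc hh⟩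
          simp only [resolve_threshold, resolve_threshold_alt, hE, hc, hh, hm, Bool.false_eq_true,
                     if_false, if_true, hmax, Option.getD_some]
          decide
        | false =>
          simp only [resolve_threshold, resolve_threshold_alt, hE, hc, hh, hm, Bool.false_eq_true,
                     if_false, hits_nil _ hc hh hm, List.max?_nil, Option.getD_none]
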